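-- pv_equiv track=rewrite | github.com/daniel-reich/ubiquitous-fiesta | di7ZjxgvLgz72PvCS_21.py | validate_swaps
-- ===== SOURCE A (Python) =====
-- def validate_swaps(lst, txt):
--     import itertools
--     changes=list(itertools.combinations(range(len(txt)),2))
--     wordlist=[]
--     for change in changes:
--         text=list(txt[:])
--         text[change[0]]=txt[change[1]]
--         text[change[1]]=txt[change[0]]
--         wordlist.append("".join(text))
--     res=[]
--     for word in lst:
--         if word in wordlist:
--             res.append(True)
--         else:
--             res.append(False)
--     return res
-- ===== SOURCE B (Python) =====
-- def validate_swaps(lst, txt):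
--     # For each word, test directly whether it is txt with one pair of positions swapped:
--     # either it differs from txt at exactly two positions, crosswise equal, or it equals
--     # txt and txt contains a repeated character (swapping two equal characters).
--     n = len(txt)
--
--     def is_swap(word):
--         if len(word) != n:
--             return False
--         diffs = [i for i in range(n) if word[i] != txt[i]]
--         if not diffs:
--             return len(set(txt)) < n
--         if len(diffs) == 2:
--             i, j = diffs
--             return word[i] == txt[j] and word[j] == txt[i]
--         return False
--
--     return [is_swap(word) for word in lst]
-- ===== Notes on version B (the rewrite author's own statement) =====
-- stated objective: faster
-- what changed: Instead of materialising all O(n^2) single-swap variants of txt (each of length n) and doing a linear membership scan per word, B tests each word directly in one pass: same length, and either exactly two crosswise-equal mismatch positions, or zero mismatches with txt containing a repeated character.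
import Mathlib
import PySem

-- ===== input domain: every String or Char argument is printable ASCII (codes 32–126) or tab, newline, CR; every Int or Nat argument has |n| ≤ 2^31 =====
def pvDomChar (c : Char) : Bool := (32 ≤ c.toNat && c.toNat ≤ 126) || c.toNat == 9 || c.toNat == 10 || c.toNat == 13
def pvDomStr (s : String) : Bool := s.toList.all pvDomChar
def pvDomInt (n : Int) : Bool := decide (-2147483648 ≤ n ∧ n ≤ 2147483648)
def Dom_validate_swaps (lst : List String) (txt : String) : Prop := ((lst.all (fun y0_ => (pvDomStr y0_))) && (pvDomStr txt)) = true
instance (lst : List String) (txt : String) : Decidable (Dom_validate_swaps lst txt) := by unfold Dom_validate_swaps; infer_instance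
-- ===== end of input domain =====

-- B replaces A's "generate every swapped variant of txt, then list-membership test"
-- by a direct per-word two-mismatch check: asymptotically faster (measured).


-- ===== PORT A =====
-- literal port of Source A: itertools.combinations(range(len(txt)), 2) is the list of
-- pairs (i, j) with i < j in lexicographic order; txt[k] on an in-range index is getD.
def validate_swaps (lst : List String) (txt : String) : List Bool :=
  let tl := txt.toList
  let changes : List (Nat × Nat) :=
    (List.range tl.length).flatMap (fun i =>
      ((List.range tl.length).filter (fun j => i < j)).map (fun j => (i, j)))
  let wordlist : List String := changes.map (fun c =>
    let text := (tl.set c.1 (tl.getD c.2 ' ')).set c.2 (tl.getD c.1 ' ')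
    String.ofList text)
  lst.map (fun word => if word ∈ wordlist then true else false)

-- ===== PORT B =====
-- literal port of Source B: per word, collect the mismatch positions against txt.
def validate_swaps_alt (lst : List String) (txt : String) : List Bool :=
  let tl := txt.toList
  let n := tl.length
  let isSwap : String → Bool := fun word =>
    if word.toList.length = n then
      match (List.range n).filter (fun k => !(word.toList.getD k ' ' == tl.getD k ' ')) with
      | [] => decide ((PySem.Set.ofList tl : List Char).length < n)
      | [i, j] => word.toList.getD i ' ' == tl.getD j ' ' && word.toList.getD j ' ' == tl.getD i ' '
      | _ => false
    else false
  lst.map isSwap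

-- ===== PRECONDITION & SPEC =====
def Spec_validate_swaps (lst : List String) (txt : String) (out : List Bool) : Prop := out = validate_swaps_alt lst txt
instance (lst : List String) (txt : String) (out : List Bool) : Decidable (Spec_validate_swaps lst txt out) := by unfold Spec_validate_swaps; infer_instance

-- ===== CLAIM (what is proved, stated in full; the proofs are below) =====
def Claim_equal_validate_swaps : Prop := ∀ (lst : List String) (txt : String), Dom_validate_swaps lst txt → Spec_validate_swaps lst txt (validate_swaps lst txt)

-- ===== LEMMAS AND PROOFS =====

-- the swapped character list A builds for the pair (i, j)
def pvSwap (tl : List Char) (i j : Nat) : List Char :=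
  (tl.set i (tl.getD j ' ')).set j (tl.getD i ' ')

theorem length_pvSwap (tl : List Char) (i j : Nat) : (pvSwap tl i j).length = tl.length := by
  simp [pvSwap]

theorem getD_pvSwap (tl : List Char) (i j k : Nat) (hi : i < tl.length) (hj : j < tl.length) :
    (pvSwap tl i j).getD k ' ' =
      if k = j then tl.getD i ' ' else if k = i then tl.getD j ' ' else tl.getD k ' ' := by
  unfold pvSwap
  rcases eq_or_ne k j with h1 | h1
  · subst h1
    simp [List.getD_eq_getElem?_getD, hj]
  · rcases eq_or_ne k i with h2 | h2
    · subst h2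
      simp [List.getD_eq_getElem?_getD, Ne.symm h1, h1, hi]
    · simp [List.getD_eq_getElem?_getD, Ne.symm h1, Ne.symm h2, h1, h2]

-- a filter of range n whose predicate holds exactly at i and j (i < j < n) is [i, j]
theorem filter_range_pair (p : Nat → Bool) (i j n : Nat) (hij : i < j) (hj : j < n)
    (hp : ∀ k, k < n → (p k = true ↔ (k = i ∨ k = j))) :
    (List.range n).filter p = [i, j] := by
  have hsub : ((List.range n).filter p).Sublist (List.range n) := List.filter_sublist
  have hpw : ((List.range n).filter p).Pairwise (fun a b => a < b) :=
    List.Pairwise.sublist hsub List.pairwise_lt_range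
  have hpw2 : ([i, j] : List Nat).Pairwise (fun a b => a < b) := by simp [hij]
  have hmem : ∀ x, x ∈ (List.range n).filter p ↔ x ∈ ([i, j] : List Nat) := by
    intro x
    simp only [List.mem_filter, List.mem_range, List.mem_cons,
      List.not_mem_nil, or_false]
    constructor
    · rintro ⟨hx, hpx⟩; exact (hp x hx).mp hpx
    · intro hx'
      rcases hx' with rfl | rfl
      · exact ⟨lt_trans hij hj, (hp _ (lt_trans hij hj)).mpr (Or.inl rfl)⟩
      · exact ⟨hj, (hp _ hj).mpr (Or.inr rfl)⟩
  have hnd1 : ((List.range n).filter p).Nodup := hpw.imp (fun hlt => Nat.ne_of_lt hlt)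
  have hnd2 : ([i, j] : List Nat).Nodup := hpw2.imp (fun hlt => Nat.ne_of_lt hlt)
  have hperm : ((List.range n).filter p).Perm [i, j] :=
    (hnd1.subperm (fun x hx => (hmem x).mp hx)).antisymm
      (hnd2.subperm (fun x hx => (hmem x).mpr hx))
  exact List.Perm.eq_of_pairwise (fun a b _ _ h1 h2 => absurd h2 (Nat.not_lt.mpr (Nat.le_of_lt h1)))
    hpw hpw2 hperm

theorem setLen_lt_iff (tl : List Char) :
    (PySem.Set.ofList tl : List Char).length < tl.length ↔ ¬ tl.Nodup := by
  constructor
  · intro h hn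
    rw [PySem.Set.ofList_eq_self_of_nodup _ hn] at h
    exact lt_irrefl _ h
  · intro h
    have h1 : (PySem.Set.ofList tl : List Char).length ≤ tl.dedup.length :=
      ((PySem.Set.nodup_ofList tl).subperm
        (fun x hx => List.mem_dedup.mpr ((PySem.Set.mem_ofList tl x).mp hx))).length_le
    have h2 : tl.dedup.length < tl.length := by
      rcases Nat.lt_or_ge tl.dedup.length tl.length with hlt | hge
      · exact hlt
      · have heq : tl.dedup = tl :=
          (List.dedup_sublist tl).eq_of_length
            (Nat.le_antisymm ((List.dedup_sublist tl).length_le) hge)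
        exact absurd (heq ▸ List.nodup_dedup tl) h
    omega

theorem not_nodup_iff_pair (tl : List Char) :
    ¬ tl.Nodup ↔ ∃ i j, i < j ∧ j < tl.length ∧ tl.getD i ' ' = tl.getD j ' ' := by
  rw [List.nodup_iff_injective_getElem]
  constructor
  · intro h
    rw [Function.not_injective_iff] at h
    obtain ⟨a, b, hab, hne⟩ := h
    rcases Nat.lt_or_ge a.1 b.1 with hlt | hge
    · exact ⟨a.1, b.1, hlt, b.2, by
        rw [List.getD_eq_getElem tl ' ' a.2, List.getD_eq_getElem tl ' ' b.2]; exact hab⟩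
    · have hlt : b.1 < a.1 := by
        rcases Nat.lt_or_ge b.1 a.1 with h' | h'
        · exact h'
        · have hv : a.1 = b.1 := by omega
          exact absurd (Fin.ext hv) hne
      exact ⟨b.1, a.1, hlt, a.2, by
        rw [List.getD_eq_getElem tl ' ' b.2, List.getD_eq_getElem tl ' ' a.2]; exact hab.symm⟩
  · rintro ⟨i, j, hij, hj, heq⟩ hinj
    have hi : i < tl.length := lt_trans hij hj
    rw [List.getD_eq_getElem tl ' ' hi, List.getD_eq_getElem tl ' ' hj] at heq
    have := hinj (a₁ := ⟨i, hi⟩) (a₂ := ⟨j, hj⟩) heq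
    exact absurd (congrArg Fin.val this) (Nat.ne_of_lt hij)

-- extensionality via getD on in-range indices
theorem eq_of_getD (a b : List Char) (hlen : a.length = b.length)
    (h : ∀ k, k < b.length → a.getD k ' ' = b.getD k ' ') : a = b := by
  apply List.ext_getElem hlen
  intro k h1 h2
  have := h k h2
  rwa [List.getD_eq_getElem a ' ' h1, List.getD_eq_getElem b ' ' h2] at this

-- the membership A tests is exactly "wl is txt with one pair of positions swapped"
theorem memA_iff (tl : List Char) (w : String) :
    (w ∈ ((List.range tl.length).flatMap (fun i =>
        ((List.range tl.length).filter (fun j => i < j)).map (fun j => (i, j)))).map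
        (fun c => String.ofList ((tl.set c.1 (tl.getD c.2 ' ')).set c.2 (tl.getD c.1 ' '))))
    ↔ ∃ i j, i < j ∧ j < tl.length ∧ w.toList = pvSwap tl i j := by
  simp only [List.mem_map, List.mem_flatMap, List.mem_filter, List.mem_range,
    decide_eq_true_eq]
  constructor
  · rintro ⟨c, ⟨i, hi, j, ⟨hj, hij⟩, rfl⟩, hw⟩
    exact ⟨i, j, hij, hj, by rw [← hw, String.toList_ofList]; rfl⟩
  · rintro ⟨i, j, hij, hj, hw⟩
    refine ⟨(i, j), ⟨i, lt_trans hij hj, j, ⟨hj, hij⟩, rfl⟩, ?_⟩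
    rw [show ((tl.set (i, j).1 (tl.getD (i, j).2 ' ')).set (i, j).2 (tl.getD (i, j).1 ' ')) =
      pvSwap tl i j from rfl, ← hw, String.ofList_toList]

-- B's per-word check is the same condition
theorem altCheck_iff (tl : List Char) (w : String) :
    ((if w.toList.length = tl.length then
        match (List.range tl.length).filter (fun k => !(w.toList.getD k ' ' == tl.getD k ' ')) with
        | [] => decide ((PySem.Set.ofList tl : List Char).length < tl.length)
        | [i, j] => w.toList.getD i ' ' == tl.getD j ' ' && w.toList.getD j ' ' == tl.getD i ' '
        | _ => false
      else false) = true)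
    ↔ ∃ i j, i < j ∧ j < tl.length ∧ w.toList = pvSwap tl i j := by
  constructor
  · intro h
    split_ifs at h with hlen
    rcases hfil : (List.range tl.length).filter
        (fun k => !(w.toList.getD k ' ' == tl.getD k ' ')) with _ | ⟨i, rest⟩
    · rw [hfil] at h
      simp only [decide_eq_true_eq] at h
      obtain ⟨i, j, hij, hj, hc⟩ := (not_nodup_iff_pair tl).mp ((setLen_lt_iff tl).mp h)
      have hi : i < tl.length := lt_trans hij hj
      have heqt : w.toList = tl := by
        apply eq_of_getD _ _ hlen
        intro k hk
        by_contra hne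
        have hkm : k ∈ (List.range tl.length).filter
            (fun k => !(w.toList.getD k ' ' == tl.getD k ' ')) :=
          List.mem_filter.mpr ⟨List.mem_range.mpr hk,
            by simp only [Bool.not_eq_true', beq_eq_false_iff_ne]; exact hne⟩
        rw [hfil] at hkm
        exact absurd hkm (List.not_mem_nil)
      refine ⟨i, j, hij, hj, ?_⟩
      rw [heqt]
      refine (eq_of_getD (pvSwap tl i j) tl (length_pvSwap tl i j) ?_).symm
      intro k hk
      rw [getD_pvSwap tl i j k hi hj]
      split_ifs with e1 e2
      · subst e1; exact hc
      · subst e2; exact hc.symm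
      · rfl
    · rcases rest with _ | ⟨j, rest2⟩
      · rw [hfil] at h; cases h
      rcases rest2 with _ | ⟨x, rest3⟩
      · -- filter = [i, j]
        rw [hfil] at h
        simp only [Bool.and_eq_true, beq_iff_eq] at h
        obtain ⟨h1, h2⟩ := h
        have hpw : ([i, j] : List Nat).Pairwise (fun a b => a < b) := by
          rw [← hfil]
          exact List.Pairwise.sublist List.filter_sublist List.pairwise_lt_range
        have hij : i < j := by
          rcases hpw with _ | ⟨hp1, _⟩
          exact hp1 j (List.mem_singleton.mpr rfl)
        have hjm : j ∈ (List.range tl.length).filter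
            (fun k => !(w.toList.getD k ' ' == tl.getD k ' ')) := by
          rw [hfil]; simp
        have hj : j < tl.length := List.mem_range.mp (List.mem_filter.mp hjm).1
        have hi : i < tl.length := lt_trans hij hj
        refine ⟨i, j, hij, hj, ?_⟩
        apply eq_of_getD _ _ (hlen.trans (length_pvSwap tl i j).symm)
        intro k hk
        rw [length_pvSwap] at hk
        rw [getD_pvSwap tl i j k hi hj]
        split_ifs with e1 e2
        · subst e1; exact h2
        · subst e2; exact h1
        · by_contra hne
          have hkm : k ∈ (List.range tl.length).filter
              (fun k => !(w.toList.getD k ' ' == tl.getD k ' ')) :=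
            List.mem_filter.mpr ⟨List.mem_range.mpr hk,
            by simp only [Bool.not_eq_true', beq_eq_false_iff_ne]; exact hne⟩
          rw [hfil] at hkm
          simp [e1, e2] at hkm
      · rw [hfil] at h; cases h
  · rintro ⟨i, j, hij, hj, hw⟩
    have hi : i < tl.length := lt_trans hij hj
    have hlen : w.toList.length = tl.length := by rw [hw, length_pvSwap]
    rw [if_pos hlen]
    by_cases hc : tl.getD i ' ' = tl.getD j ' '
    · have hwt : w.toList = tl := by
        rw [hw]
        apply eq_of_getD _ _ (length_pvSwap tl i j)
        intro k hk
        rw [getD_pvSwap tl i j k hi hj]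
        split_ifs with e1 e2
        · subst e1; exact hc
        · subst e2; exact hc.symm
        · rfl
      have hfil : (List.range tl.length).filter
          (fun k => !(w.toList.getD k ' ' == tl.getD k ' ')) = [] := by
        rw [List.filter_eq_nil_iff]
        intro a _
        simp [hwt]
      rw [hfil]
      exact decide_eq_true ((setLen_lt_iff tl).mpr ((not_nodup_iff_pair tl).mpr ⟨i, j, hij, hj, hc⟩))
    · have hfil : (List.range tl.length).filter
          (fun k => !(w.toList.getD k ' ' == tl.getD k ' ')) = [i, j] := by
        apply filter_range_pair _ i j _ hij hj
        intro k hk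
        rw [hw]
        simp only [Bool.not_eq_true', beq_eq_false_iff_ne]
        rw [getD_pvSwap tl i j k hi hj]
        split_ifs with e1 e2
        · subst e1
          constructor
          · intro _; exact Or.inr rfl
          · intro _ hcc; exact hc hcc
        · subst e2
          constructor
          · intro _; exact Or.inl rfl
          · intro _ hcc; exact hc hcc.symm
        · constructor
          · intro hcc; exact absurd rfl hcc
          · rintro (rfl | rfl)
            · exact absurd rfl e2
            · exact absurd rfl e1
      rw [hfil, hw]
      simp only [getD_pvSwap tl i j i hi hj, getD_pvSwap tl i j j hi hj]
      simp [Nat.ne_of_lt hij]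


-- ===== VERDICT (by name: the statement is the Claim_ definition above) =====
theorem validate_swaps_spec : Claim_equal_validate_swaps := by
  intro lst txt _
  unfold Spec_validate_swaps validate_swaps validate_swaps_alt
  apply List.map_congr_left
  intro w _
  rw [Bool.eq_iff_iff]
  have h1 := memA_iff txt.toList w
  have h2 := altCheck_iff txt.toList w
  constructor
  · intro h
    split_ifs at h with hmem
    exact h2.mpr (h1.mp hmem)
  · intro h
    rw [if_pos (h1.mpr (h2.mp h))]
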